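-- pv_equiv track=rewrite | github.com/koinos/koinos-contracts-cpp | doc/hl.py | compute_shift
-- ===== SOURCE A (Python) =====
-- def compute_shift(r, bits):
--     m = 1 << bits
--     p = 1
--     shift = 0
--     while r*p < m:
--         p <<= 1
--         shift += 1
--     return shift-1
-- ===== SOURCE B (Python) =====
-- def compute_shift(r, bits):
--     return max(-1, bits - r.bit_length())
-- ===== Notes on version B (the rewrite author's own statement) =====
-- stated objective: faster
-- what changed: replaces the doubling loop (O(bits) iterations, each with a big-int multiply) by the closed form max(-1, bits - r.bit_length())
import Mathlib
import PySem

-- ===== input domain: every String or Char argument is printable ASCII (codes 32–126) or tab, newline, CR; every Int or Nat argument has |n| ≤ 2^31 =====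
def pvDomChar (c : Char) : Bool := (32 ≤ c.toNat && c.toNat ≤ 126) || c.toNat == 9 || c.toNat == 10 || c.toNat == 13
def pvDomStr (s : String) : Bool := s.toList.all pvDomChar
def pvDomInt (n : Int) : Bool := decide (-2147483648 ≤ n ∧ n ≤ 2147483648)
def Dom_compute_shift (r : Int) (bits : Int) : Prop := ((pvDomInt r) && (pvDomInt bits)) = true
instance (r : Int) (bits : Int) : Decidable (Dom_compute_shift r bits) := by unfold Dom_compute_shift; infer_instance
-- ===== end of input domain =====

-- B replaces A's doubling loop by the closed form max(-1, bits - r.bit_length()) (objective: faster).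

-- ===== PORT A =====
-- A's while-loop: the guard carries the extra conjuncts 1 ≤ r ∧ 1 ≤ p only to make the
-- recursion well-founded (the Python loop diverges for r ≤ 0); on Pre_ (r ≥ 1) p stays ≥ 1
-- and the guard is exactly Python's 'r*p < m'.
def computeShiftLoopA (m r p shift : Int) : Int :=
  if h : r * p < m ∧ 1 ≤ r ∧ 1 ≤ p then
    computeShiftLoopA m r (p * 2) (shift + 1)
  else
    shift - 1
termination_by (m - p).toNat
decreasing_by
  obtain ⟨h1, h2, h3⟩ := h
  have : p ≤ r * p := le_mul_of_one_le_left (by omega) h2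
  omega

-- m = 1 << bits; exact for bits ≥ 0 (Python raises for bits < 0, excluded by Pre_)
def compute_shift (r : Int) (bits : Int) : Int :=
  computeShiftLoopA (2 ^ bits.toNat) r 1 0

-- ===== PORT B =====
-- r.bit_length() for r ≥ 1 is Nat.log2 r + 1 (library call for Python's int.bit_length)
def compute_shift_alt (r : Int) (bits : Int) : Int :=
  max (-1) (bits - ((Nat.log2 r.toNat : Int) + 1))

-- ===== PRECONDITION & SPEC =====
-- Pre_: A diverges for r ≤ 0 (the loop never exits) and raises ValueError for bits < 0.
def Pre_compute_shift (r : Int) (bits : Int) : Prop := 1 ≤ r ∧ 0 ≤ bits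
instance (r : Int) (bits : Int) : Decidable (Pre_compute_shift r bits) := by unfold Pre_compute_shift; infer_instance
def pvWitness_compute_shift : Int × Int := (3, 8)

def Spec_compute_shift (r : Int) (bits : Int) (out : Int) : Prop := out = compute_shift_alt r bits
instance (r : Int) (bits : Int) (out : Int) : Decidable (Spec_compute_shift r bits out) := by unfold Spec_compute_shift; infer_instance

-- ===== CLAIM (what is proved, stated in full; the proofs are below) =====
def Claim_equal_compute_shift : Prop := ∀ (r : Int) (bits : Int), Dom_compute_shift r bits → Pre_compute_shift r bits → Spec_compute_shift r bits (compute_shift r bits)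

-- ===== LEMMAS AND PROOFS =====

-- proof helper: the number of iterations of A's loop
def computeShiftSteps (m r p : Int) : Nat :=
  if h : r * p < m ∧ 1 ≤ r ∧ 1 ≤ p then
    computeShiftSteps m r (p * 2) + 1
  else
    0
termination_by (m - p).toNat
decreasing_by
  obtain ⟨h1, h2, h3⟩ := h
  have : p ≤ r * p := le_mul_of_one_le_left (by omega) h2
  omega

lemma loopA_eq_steps (m r p shift : Int) :
    computeShiftLoopA m r p shift = shift + (computeShiftSteps m r p : Int) - 1 := by
  fun_induction computeShiftSteps m r p generalizing shift with
  | case1 p h ih =>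
      rw [computeShiftLoopA, dif_pos h, ih]
      push_cast; ring
  | case2 p h =>
      rw [computeShiftLoopA, dif_neg h]
      simp

lemma steps_ge (m r p : Int) (hr : 1 ≤ r) (hp : 1 ≤ p) :
    m ≤ r * p * 2 ^ (computeShiftSteps m r p) := by
  fun_induction computeShiftSteps m r p with
  | case1 p h ih =>
      rw [pow_succ]
      calc m ≤ r * (p * 2) * 2 ^ (computeShiftSteps m r (p * 2)) := ih (by omega)
        _ = r * p * (2 ^ (computeShiftSteps m r (p * 2)) * 2) := by ring
  | case2 p h =>
      simp only [pow_zero, mul_one]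
      by_contra hc
      exact h ⟨by omega, hr, hp⟩

lemma steps_min (m r p : Int) (hs : 0 < computeShiftSteps m r p) :
    r * p * 2 ^ (computeShiftSteps m r p - 1) < m := by
  fun_induction computeShiftSteps m r p with
  | case1 p h ih =>
      by_cases h0 : 0 < computeShiftSteps m r (p * 2)
      · have hi := ih h0
        have he : computeShiftSteps m r (p * 2) + 1 - 1
            = (computeShiftSteps m r (p * 2) - 1) + 1 := by omega
        rw [he, pow_succ]
        calc r * p * (2 ^ (computeShiftSteps m r (p * 2) - 1) * 2)
            = r * (p * 2) * 2 ^ (computeShiftSteps m r (p * 2) - 1) := by ring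
          _ < m := hi
      · have hz : computeShiftSteps m r (p * 2) = 0 := by omega
        simp only [hz]
        simpa using h.1
  | case2 p h =>
      omega

-- the arithmetic core: from the two-sided characterisation of the step count,
-- the result equals the closed form
lemma final_arith (r bits : Int) (s L : Nat) (hr : 1 ≤ r) (hb : 0 ≤ bits)
    (hlow : (2:Int) ^ L ≤ r) (hhigh : r < 2 ^ (L + 1))
    (hge : (2:Int) ^ bits.toNat ≤ r * 2 ^ s)
    (hmin : s ≠ 0 → r * 2 ^ (s - 1) < (2:Int) ^ bits.toNat) :
    (0 : Int) + s - 1 = max (-1) (bits - ((L : Int) + 1)) := by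
  have h2 : (1 : Int) < 2 := by norm_num
  by_cases h0 : s = 0
  · subst h0
    have hge' : (2:Int) ^ bits.toNat ≤ r := by simpa using hge
    have : (2:Int) ^ bits.toNat < 2 ^ (L + 1) := lt_of_le_of_lt hge' hhigh
    have hlt : bits.toNat < L + 1 := (pow_lt_pow_iff_right₀ h2).mp this
    rw [max_eq_left (by omega)]
    simp
  · have hm := hmin h0
    -- 2^(L+(s-1)) ≤ r*2^(s-1) < 2^bits
    have h1 : (2:Int) ^ (L + (s - 1)) < 2 ^ bits.toNat := by
      calc (2:Int) ^ (L + (s - 1)) = 2 ^ L * 2 ^ (s - 1) := by rw [pow_add]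
        _ ≤ r * 2 ^ (s - 1) := mul_le_mul_of_nonneg_right hlow (by positivity)
        _ < 2 ^ bits.toNat := hm
    have hub : L + (s - 1) < bits.toNat := (pow_lt_pow_iff_right₀ h2).mp h1
    have h2' : (2:Int) ^ bits.toNat < 2 ^ (L + 1 + s) := by
      calc (2:Int) ^ bits.toNat ≤ r * 2 ^ s := hge
        _ < 2 ^ (L + 1) * 2 ^ s := mul_lt_mul_of_pos_right hhigh (by positivity)
        _ = 2 ^ (L + 1 + s) := (pow_add 2 (L+1) s).symm
    have hlb : bits.toNat < L + 1 + s := (pow_lt_pow_iff_right₀ h2).mp h2'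
    rw [max_eq_right (by omega)]
    omega

theorem compute_shift_main (r bits : Int) (hr : 1 ≤ r) (hb : 0 ≤ bits) :
    compute_shift r bits = compute_shift_alt r bits := by
  unfold compute_shift compute_shift_alt
  rw [loopA_eq_steps]
  have hrn : (1 : Nat) ≤ r.toNat := by omega
  have hlow : (2:Int) ^ Nat.log2 r.toNat ≤ r := by
    have h := Nat.log2_self_le (n := r.toNat) (by omega)
    have := (Nat.cast_le (α := Int)).mpr h
    push_cast at this; omega
  have hhigh : r < (2:Int) ^ (Nat.log2 r.toNat + 1) := by
    have h := Nat.lt_log2_self (n := r.toNat)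
    have := (Nat.cast_lt (α := Int)).mpr h
    push_cast at this; omega
  have hge := steps_ge (2 ^ bits.toNat) r 1 hr (by omega)
  rw [mul_one] at hge
  have hmin : computeShiftSteps (2 ^ bits.toNat) r 1 ≠ 0 →
      r * 2 ^ (computeShiftSteps (2 ^ bits.toNat) r 1 - 1) < (2:Int) ^ bits.toNat := by
    intro h
    have := steps_min (2 ^ bits.toNat) r 1 (by omega)
    rwa [mul_one] at this
  exact final_arith r bits _ _ hr hb hlow hhigh hge hmin

-- ===== VERDICT (by name: the statement is the Claim_ definition above) =====
theorem compute_shift_spec : Claim_equal_compute_shift := by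
  intro r bits _ hpre
  unfold Spec_compute_shift
  exact compute_shift_main r bits hpre.1 hpre.2
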